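-- pv_equiv track=rewrite | github.com/PostScriptReal/Snark_Compiler | helpers.py | subprocessHelper
-- ===== SOURCE A (Python) =====
-- def subprocessHelper(query):
--     tOutputTmp = query.split('\n')
--     tOutputTmp.pop(0)
--     tOutput = ''
--     count = -1
--     llChk = len(tOutputTmp) - 1
--     if len(tOutputTmp) == 1:
--         tOutput += tOutputTmp[0]
--     else:
--         for l in tOutputTmp:
--             count += 1
--             if count == llChk:
--                 tOutput += tOutputTmp[count]
--             else:
--                 tOutput += tOutputTmp[count] + '\n'
--     return tOutput
-- ===== SOURCE B (Python) =====
-- def subprocessHelper(query):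
--     idx = query.find('\n')
--     if idx == -1:
--         return ''
--     return query[idx + 1:]
-- ===== Notes on version B (the rewrite author's own statement) =====
-- stated objective: simpler
-- what changed: Instead of splitting the string into a list of lines, popping the first, and rejoining the rest in an indexed loop, B finds the first newline and returns one slice past it (empty string if there is none).
import Mathlib
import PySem

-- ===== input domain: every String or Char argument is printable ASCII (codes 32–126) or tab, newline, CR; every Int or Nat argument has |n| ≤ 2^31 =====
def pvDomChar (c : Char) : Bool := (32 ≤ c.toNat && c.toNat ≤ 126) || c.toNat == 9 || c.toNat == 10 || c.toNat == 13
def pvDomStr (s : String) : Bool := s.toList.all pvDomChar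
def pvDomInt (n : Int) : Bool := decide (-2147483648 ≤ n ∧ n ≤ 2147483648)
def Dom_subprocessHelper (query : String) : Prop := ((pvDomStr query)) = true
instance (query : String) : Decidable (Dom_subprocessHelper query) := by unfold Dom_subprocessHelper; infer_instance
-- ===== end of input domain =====

-- B drops the first line by finding the first newline and slicing past it, instead of
-- A's split-into-list / pop / indexed rejoin loop: simpler, same observable result.

-- ===== PORT A =====
def subprocessHelper (query : String) : String :=
  match PySem.Str.split? query "\n" with
  | none => ""          -- unreachable: the separator "\n" is nonempty
  | some t0 =>
    match PySem.List.pop? t0 (0 : Int) with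
    | none => ""        -- unreachable: str.split always returns a nonempty list
    | some (_, tOutputTmp) =>
      let llChk : Int := (tOutputTmp.length : Int) - 1
      if tOutputTmp.length = 1 then
        "" ++ ((PySem.List.pyGet? tOutputTmp (0 : Int)).getD "")
      else
        (tOutputTmp.foldl
          (fun (st : String × Int) (_l : String) =>
            let count := st.2 + 1
            if count = llChk then
              (st.1 ++ ((PySem.List.pyGet? tOutputTmp count).getD ""), count)
            else
              (st.1 ++ ((PySem.List.pyGet? tOutputTmp count).getD "") ++ "\n", count))
          ("", -1)).1

-- ===== PORT B =====
def subprocessHelper_alt (query : String) : String :=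
  let idx := PySem.Str.find query "\n"
  if idx = -1 then "" else PySem.Str.slice query (some (idx + 1)) none

-- ===== PRECONDITION & SPEC =====
def Spec_subprocessHelper (query : String) (out : String) : Prop := out = subprocessHelper_alt query
instance (query : String) (out : String) : Decidable (Spec_subprocessHelper query out) := by unfold Spec_subprocessHelper; infer_instance

-- ===== CLAIM (what is proved, stated in full; the proofs are below) =====
def Claim_equal_subprocessHelper : Prop := ∀ (query : String), Dom_subprocessHelper query → Spec_subprocessHelper query (subprocessHelper query)

-- ===== LEMMAS AND PROOFS =====

/-- "join with '\n', no trailing separator", char level: what A's loop builds. -/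
def jtc (nl : Char) : List (List Char) → List Char
  | [] => []
  | [x] => x
  | x :: y :: r => x ++ nl :: jtc nl (y :: r)

/-- PySem's fueled split with a one-char separator is Mathlib's `List.splitOn`. -/
theorem splitOn_go_eq (c : Char) (l : List Char) (fuel : Nat) (cur : List Char)
    (acc : List (List Char)) (hf : l.length ≤ fuel) :
    PySem.Chars.splitOn.go [c] fuel l cur acc
      = acc.reverse ++ (l.splitOn c).modifyHead (cur.reverse ++ ·) := by
  induction l generalizing fuel cur acc with
  | nil =>
    cases fuel <;> simp [PySem.Chars.splitOn.go, List.splitOn_nil]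
  | cons c' rest ih =>
    cases fuel with
    | zero => simp at hf
    | succ f =>
      by_cases hc : c = c'
      · subst hc
        simp only [PySem.Chars.splitOn.go, List.isPrefixOf, beq_self_eq_true, Bool.true_and,
          if_true]
        rw [show List.drop [c].length (c :: rest) = rest from rfl,
          ih f [] (cur.reverse :: acc) (by simpa using Nat.le_of_succ_le_succ hf)]
        simp only [List.splitOn, List.splitOnP_cons, beq_self_eq_true, if_true,
          List.reverse_nil, List.nil_append, List.modifyHead_cons]
        rw [show (fun x : List Char => x) = @id (List Char) from rfl, List.modifyHead_id]
        simp
      · have hp : List.isPrefixOf [c] (c' :: rest) = false := by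
          simp [List.isPrefixOf, hc]
        simp only [PySem.Chars.splitOn.go, hp, Bool.false_eq_true, if_false]
        rw [ih f (c' :: cur) acc (by simpa using Nat.le_of_succ_le_succ hf)]
        simp [List.splitOn, List.splitOnP_cons, Ne.symm hc, List.modifyHead_modifyHead,
          Function.comp_def]

theorem chars_splitOn_eq (c : Char) (l : List Char) :
    PySem.Chars.splitOn l [c] = l.splitOn c := by
  unfold PySem.Chars.splitOn
  rw [splitOn_go_eq c l (l.length + 1) [] [] (by omega),
    show (fun x : List Char => List.reverse [] ++ x) = @id (List Char) from rfl,
    List.modifyHead_id]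
  simp

/-- PySem's `find` with a one-char needle is membership + `idxOf`. -/
theorem find_go_eq (c : Char) (l : List Char) (k : Nat) :
    PySem.Chars.find.go [c] l k
      = if c ∈ l then ((k + l.idxOf c : Nat) : Int) else -1 := by
  induction l generalizing k with
  | nil => simp [PySem.Chars.find.go]
  | cons c' rest ih =>
    by_cases hc : c' = c
    · subst hc
      simp [PySem.Chars.find.go, List.isPrefixOf, List.idxOf_cons]
    · simp only [PySem.Chars.find.go, List.isPrefixOf, beq_iff_eq, hc, false_and, Bool.false_and,
        if_false, ih]
      simp [List.mem_cons, hc, Ne.symm hc, List.idxOf_cons]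
      split_ifs <;> [push_cast; rfl] <;> omega

theorem chars_find_eq (c : Char) (l : List Char) :
    PySem.Chars.find l [c] = if c ∈ l then (l.idxOf c : Int) else -1 := by
  simpa using find_go_eq c l 0

/-- Elements strictly before `idxOf c` are not `c`. -/
theorem not_mem_take_idxOf (c : Char) (l : List Char) :
    ∀ x ∈ l.take (l.idxOf c), ¬ (x == c) = true := by
  intro x hx
  rw [List.mem_take_iff_getElem] at hx
  obtain ⟨j, hj, rfl⟩ := hx
  have hj' : j < List.findIdx (fun y => y == c) l := by
    have : List.idxOf c l = List.findIdx (fun y => y == c) l := rfl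
    omega
  simpa using List.not_of_lt_findIdx hj'

/-- `splitOn` of a list containing `c`: head is the prefix, rest is the split of the suffix. -/
theorem splitOn_of_mem (c : Char) (l : List Char) (h : c ∈ l) :
    l.splitOn c = l.take (l.idxOf c) :: (l.drop (l.idxOf c + 1)).splitOn c := by
  have hlt : l.idxOf c < l.length := List.idxOf_lt_length_of_mem h
  conv_lhs => rw [← List.take_append_drop (l.idxOf c) l,
    ← List.getElem_cons_drop hlt, List.getElem_idxOf hlt]
  exact List.splitOnP_first _ _ (not_mem_take_idxOf c l) c (by simp) _

/-- jtc is intercalate with a single-char separator. -/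
theorem jtc_eq_intercalate (c : Char) (xs : List (List Char)) :
    jtc c xs = [c].intercalate xs := by
  induction xs with
  | nil => simp [jtc, List.intercalate]
  | cons x rest ih =>
    cases rest with
    | nil => simp [jtc, List.intercalate]
    | cons y r =>
      simp only [jtc, ih]
      simp [List.intercalate, List.intersperse]

/-- The char-level heart of the equivalence. -/
theorem jtc_tail_splitOn (l : List Char) :
    jtc '\n' ((l.splitOn '\n').tail)
      = if '\n' ∈ l then l.drop (l.idxOf '\n' + 1) else [] := by
  by_cases h : '\n' ∈ l
  · rw [splitOn_of_mem '\n' l h]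
    simp only [List.tail_cons, h, if_true, jtc_eq_intercalate]
    exact List.intercalate_splitOn _ '\n'
  · have hs : List.splitOn '\n' l = [l] := by
      simp only [List.splitOn]
      exact List.splitOnP_eq_single _ _ (by intro x hx; simp; rintro rfl; exact h hx)
    rw [hs]
    simp [jtc, h]

/-- A's loop, with absolute indexing, builds `jtc` of the traversed suffix. -/
theorem loop_eq (t : List String) (pre post : List String) (acc : String)
    (ht : t = pre ++ post) :
    ((post.foldl
        (fun (st : String × Int) (_l : String) =>
          let count := st.2 + 1
          if count = (t.length : Int) - 1 then
            (st.1 ++ ((PySem.List.pyGet? t count).getD ""), count)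
          else
            (st.1 ++ ((PySem.List.pyGet? t count).getD "") ++ "\n", count))
        (acc, (pre.length : Int) - 1)).1).toList
      = acc.toList ++ jtc '\n' (post.map String.toList) := by
  induction post generalizing pre acc with
  | nil => simp [jtc]
  | cons x rest ih =>
    have hget : PySem.List.pyGet? t ((pre.length : Int) - 1 + 1) = some x := by
      have : (pre.length : Int) - 1 + 1 = ((pre.length : Nat) : Int) := by omega
      rw [this, PySem.List.pyGet?_natCast, ht]
      simp
    cases rest with
    | nil =>
      have hlen : (pre.length : Int) - 1 + 1 = (t.length : Int) - 1 := by
        subst ht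
        simp only [List.length_append, List.length_cons, List.length_nil]
        push_cast; omega
      simp only [List.foldl_cons, hlen, if_true, List.foldl_nil]
      rw [← hlen, hget]
      simp [jtc]
    | cons y r =>
      have hlen : ¬ ((pre.length : Int) - 1 + 1 = (t.length : Int) - 1) := by
        subst ht
        simp only [List.length_append, List.length_cons, List.length_nil]
        push_cast; omega
      have ih' := ih (pre ++ [x]) (acc ++ x ++ "\n") (by simpa using ht)
      generalize hyr : y :: r = post' at ih' ⊢
      simp only [List.foldl_cons]
      rw [if_neg hlen, hget]
      simp only [Option.getD_some]
      simp only [] at ih'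
      rw [show ((pre.length : Int) - 1 + 1) = (((pre ++ [x]).length : Int) - 1) from by
        simp only [List.length_append, List.length_cons, List.length_nil]; push_cast; omega]
      rw [ih']
      subst hyr
      simp [jtc]

/-- `loop_eq` specialised to the whole list, as the port runs it. -/
theorem loop_eq' (t : List String) :
    ((t.foldl
        (fun (st : String × Int) (_l : String) =>
          let count := st.2 + 1
          if count = (t.length : Int) - 1 then
            (st.1 ++ ((PySem.List.pyGet? t count).getD ""), count)
          else
            (st.1 ++ ((PySem.List.pyGet? t count).getD "") ++ "\n", count))
        ("", -1)).1).toList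
      = jtc '\n' (t.map String.toList) := by
  have h := loop_eq t [] t "" rfl
  simpa using h

-- ===== VERDICT (by name: the statement is the Claim_ definition above) =====
theorem subprocessHelper_spec : Claim_equal_subprocessHelper := by
  intro query _
  unfold Spec_subprocessHelper subprocessHelper subprocessHelper_alt
  have hnl : ("\n" : String).toList = ['\n'] := rfl
  have hsplit : PySem.Str.split? query "\n"
      = some (List.map String.ofList (query.toList.splitOn '\n')) := by
    simp [PySem.Str.split?, PySem.Chars.split?, hnl, chars_splitOn_eq]
  rw [hsplit]
  obtain ⟨hd, tl, hsp⟩ : ∃ hd tl, query.toList.splitOn '\n' = hd :: tl := by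
    rcases hq : query.toList.splitOn '\n' with _ | ⟨hd, tl⟩
    · exact absurd hq (List.splitOnP_ne_nil _ _)
    · exact ⟨hd, tl, rfl⟩
  rw [hsp]
  simp only [List.map_cons]
  have hpop : PySem.List.pop? (String.ofList hd :: List.map String.ofList tl) (0 : Int)
      = some (String.ofList hd, List.map String.ofList tl) := by
    simp [PySem.List.pop?, PySem.List.pyIdx?]
  rw [hpop]
  simp only []
  rw [← String.toList_inj]
  have hB : (if PySem.Str.find query "\n" = -1 then ""
      else PySem.Str.slice query (some (PySem.Str.find query "\n" + 1)) none).toList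
      = jtc '\n' ((query.toList.splitOn '\n').tail) := by
    have hfind : PySem.Str.find query "\n"
        = if '\n' ∈ query.toList then (query.toList.idxOf '\n' : Int) else -1 := by
      simp only [PySem.Str.find, hnl]
      exact chars_find_eq _ _
    rw [jtc_tail_splitOn]
    by_cases hm : '\n' ∈ query.toList
    · have hne : PySem.Str.find query "\n" ≠ -1 := by rw [hfind]; simp [hm]
      rw [if_neg hne, if_pos hm, PySem.Str.toList_slice, PySem.Chars.slice_eq_listSlice]
      rw [hfind, if_pos hm,
        show ((query.toList.idxOf '\n' : Int) + 1) = ((query.toList.idxOf '\n' + 1 : Nat) : Int)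
          from by push_cast; ring]
      exact PySem.List.slice_from_natCast _ _
    · rw [hfind, if_neg hm]
      simp [hm]
  rw [hB, hsp, List.tail_cons]
  by_cases hone : (List.map String.ofList tl).length = 1
  · rw [if_pos hone]
    obtain ⟨z, hz⟩ : ∃ z, tl = [z] := by
      rcases tl with _ | ⟨z, _ | _⟩ <;> simp_all
    subst hz
    simp [PySem.List.pyGet?, PySem.List.pyIdx?, jtc]
  · rw [if_neg hone]
    have hl := loop_eq' (List.map String.ofList tl)
    simp only [] at hl
    rw [hl]
    simp [Function.comp_def]
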